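-- pv_equiv track=rewrite | github.com/mapbox/mapbox-navigation-android | scripts/validate-changelog.py | group_by_versions
-- ===== SOURCE A (Python) =====
-- def group_by_versions(lines):
--     groups = {}
--     group = []
--     group_name = ""
--     for line in lines:
--         if line.startswith("##") and len(line) > 2 and line[2] != '#':
--             if (len(group) > 0):
--                 if len(group_name.strip()) > 0:
--                     groups[group_name] = group
--                 group = []
--             group_name = line
--         elif len(line.strip()) > 0:
--             group.append(line)
--     if len(group) > 0 and len(group_name.strip()) > 0:
--         groups[group_name] = group
--     return groups
-- ===== SOURCE B (Python) =====
-- def group_by_versions(lines):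
--     def is_header(l):
--         return l.startswith("##") and len(l) > 2 and l[2] != '#'
--
--     n = len(lines)
--     # skip everything before the first version header
--     i = 0
--     while i < n and not is_header(lines[i]):
--         i += 1
--     # process one whole section at a time: [header, content ... up to next header)
--     groups = {}
--     while i < n:
--         j = i + 1
--         while j < n and not is_header(lines[j]):
--             j += 1
--         content = [l for l in lines[i + 1:j] if l.strip()]
--         if content:
--             groups[lines[i]] = content
--         i = j
--     return groups
-- ===== Notes on version B (the rewrite author's own statement) =====
-- stated objective: alternative
-- what changed: B replaces A's single streaming pass with running group/group_name accumulators flushed into the dict at each header by a two-pointer section scanner: it skips to the first header, then repeatedly advances a second index to the next header and slices the whole section out at once, filtering blanks from the slice; headers always have non-blank names, so A's name.strip() guard disappears.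
import Mathlib
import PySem

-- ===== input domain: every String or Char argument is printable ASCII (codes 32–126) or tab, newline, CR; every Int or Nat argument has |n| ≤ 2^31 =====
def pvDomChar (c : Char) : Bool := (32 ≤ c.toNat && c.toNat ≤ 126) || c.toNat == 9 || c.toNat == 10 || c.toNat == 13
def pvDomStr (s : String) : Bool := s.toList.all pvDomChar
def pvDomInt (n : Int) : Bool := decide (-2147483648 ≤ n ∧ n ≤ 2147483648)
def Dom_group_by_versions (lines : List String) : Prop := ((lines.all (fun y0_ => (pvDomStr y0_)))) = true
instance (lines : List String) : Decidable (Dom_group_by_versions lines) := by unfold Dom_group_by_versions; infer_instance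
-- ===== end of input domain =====

-- B replaces A's single streaming pass (running group/group_name accumulators flushed
-- into the dict on each header) by two-pointer section scanning: skip to the first
-- header, then repeatedly find the next header index and slice out the whole section;
-- objective: alternative decomposition, same cost.


-- ===== PORT A =====
-- the header test 'line.startswith("##") and len(line) > 2 and line[2] != "#"'
def pvIsHeader (line : String) : Bool :=
  PySem.Str.startswith line "##" && decide (PySem.Str.len line > 2) &&
    !(PySem.Str.pyGet? line 2 == some '#')

-- one iteration of A's for-loop; state = (groups, group, group_name)
def pvStepA (st : PySem.Dict String (List String) × List String × String) (line : String) :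
    PySem.Dict String (List String) × List String × String :=
  let groups := st.1; let group := st.2.1; let group_name := st.2.2
  if pvIsHeader line then
    if group.length > 0 then
      if PySem.Str.len (PySem.Str.strip group_name) > 0 then
        (groups.insert group_name group, [], line)
      else (groups, [], line)
    else (groups, group, line)
  else if PySem.Str.len (PySem.Str.strip line) > 0 then
    (groups, group ++ [line], group_name)
  else (groups, group, group_name)

def group_by_versions (lines : List String) : List (String × List String) :=
  let st := lines.foldl pvStepA (PySem.Dict.empty, [], "")
  (if st.2.1.length > 0 && decide (PySem.Str.len (PySem.Str.strip st.2.2) > 0) then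
      st.1.insert st.2.2 st.2.1
    else st.1).items

-- ===== PORT B =====
-- B's copy of the header test (Source B's local is_header)
def pvIsHeaderB (line : String) : Bool :=
  PySem.Str.startswith line "##" && decide (PySem.Str.len line > 2) &&
    !(PySem.Str.pyGet? line 2 == some '#')

-- 'while j < n and not is_header(lines[j]): j += 1'
def pvSkipB (lines : List String) (j : Nat) : Nat :=
  if h : j < lines.length then
    if pvIsHeaderB lines[j] then j else pvSkipB lines (j + 1)
  else j
termination_by lines.length - j

-- the port of B's outer while loop cites this for termination
theorem pvSkipB_ge_aux : ∀ (k : Nat) (lines : List String) (j : Nat),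
    lines.length ≤ j + k → j ≤ pvSkipB lines j := by
  intro k
  induction k with
  | zero => intro lines j hk; rw [pvSkipB]; rw [dif_neg (by omega)]
  | succ k ih =>
    intro lines j hk
    rw [pvSkipB]
    split
    · split
      · exact le_refl j
      · exact Nat.le_of_succ_le (ih lines (j + 1) (by omega))
    · exact le_refl j

theorem pvSkipB_ge (lines : List String) (j : Nat) : j ≤ pvSkipB lines j :=
  pvSkipB_ge_aux lines.length lines j (by omega)

-- 'while i < n: find next header j; slice the section; record it; i = j'
def pvOuterB (lines : List String) (i : Nat)
    (groups : PySem.Dict String (List String)) : PySem.Dict String (List String) :=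
  if h : i < lines.length then
    let j := pvSkipB lines (i + 1)
    let content := (PySem.List.slice lines (some ((i : Int) + 1)) (some ((j : Int)))).filter
      (fun l => !(PySem.Str.strip l == ""))
    pvOuterB lines j (if content == [] then groups else groups.insert lines[i] content)
  else groups
termination_by lines.length - i
decreasing_by have := pvSkipB_ge lines (i + 1); omega

def group_by_versions_alt (lines : List String) : List (String × List String) :=
  (pvOuterB lines (pvSkipB lines 0) PySem.Dict.empty).items

-- ===== PRECONDITION & SPEC =====
def Spec_group_by_versions (lines : List String) (out : List (String × List String)) : Prop := out = group_by_versions_alt lines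
instance (lines : List String) (out : List (String × List String)) : Decidable (Spec_group_by_versions lines out) := by unfold Spec_group_by_versions; infer_instance

-- ===== CLAIM (what is proved, stated in full; the proofs are below) =====
def Claim_equal_group_by_versions : Prop := ∀ (lines : List String), Dom_group_by_versions lines → Spec_group_by_versions lines (group_by_versions lines)

-- ===== LEMMAS AND PROOFS =====

-- the two copies of the header test are the same function
theorem pvIsHeaderB_eq (line : String) : pvIsHeaderB line = pvIsHeader line := rfl

-- head of dropWhile fails the predicate
theorem pvDropWhile_head (p : String → Bool) :
    ∀ (l : List String) (x : String) (xs : List String), l.dropWhile p = x :: xs → p x = false := by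
  intro l
  induction l with
  | nil => intro x xs h; simp at h
  | cons a l ih =>
    intro x xs h
    by_cases ha : p a
    · rw [List.dropWhile_cons_of_pos ha] at h; exact ih x xs h
    · rw [List.dropWhile_cons_of_neg ha] at h
      cases h; simpa using ha

-- a header line has a non-blank strip ('#' is not whitespace)
theorem pvHeader_strip (h : String) (hh : pvIsHeader h = true) :
    0 < (PySem.Chars.strip h.toList).length := by
  unfold pvIsHeader at hh
  simp at hh
  obtain ⟨t, ht⟩ : ('#' :: '#' :: []) <+: h.toList :=
    (PySem.Chars.startswith_iff h.toList ['#', '#']).mp hh.1.1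
  rw [← ht]
  have : PySem.Chars.strip ('#' :: '#' :: t) ≠ [] := by
    simp [PySem.Chars.strip, PySem.Chars.lstrip, PySem.Chars.rstrip]
    exact ⟨'#', by simp [show PySem.Chars.isspace '#' = false by decide]⟩
  simpa [List.length_pos_iff] using this

-- the finalization after A's loop
def pvFinalA (st : PySem.Dict String (List String) × List String × String) :
    PySem.Dict String (List String) :=
  if st.2.1.length > 0 && decide (PySem.Str.len (PySem.Str.strip st.2.2) > 0) then
    st.1.insert st.2.2 st.2.1
  else st.1

-- proof-side section recursion (one section = a header plus its lines up to the next header)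
def pvSpan : List String → PySem.Dict String (List String) → PySem.Dict String (List String)
  | [], g => g
  | h :: rest, g =>
    let pre := rest.takeWhile (fun l => !pvIsHeaderB l)
    let suf := rest.dropWhile (fun l => !pvIsHeaderB l)
    let content := pre.filter (fun l => !(PySem.Str.strip l == ""))
    pvSpan suf (if content == [] then g else g.insert h content)
termination_by l _ => l.length
decreasing_by simpa [Nat.lt_succ_iff] using List.length_dropWhile_le _ rest

-- A's loop over a run of non-header lines just filters the non-blank ones into group
theorem pvNoHeader_fold (ls : List String) :
    ∀ g c nm, (∀ l ∈ ls, pvIsHeader l = false) →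
    ls.foldl pvStepA (g, c, nm) =
      (g, c ++ ls.filter (fun l => !(PySem.Str.strip l == "")), nm) := by
  induction ls with
  | nil => intro g c nm _; simp
  | cons l ls ih =>
    intro g c nm hall
    have hl : pvIsHeader l = false := hall l (by simp)
    have hrest : ∀ x ∈ ls, pvIsHeader x = false := fun x hx => hall x (by simp [hx])
    by_cases hn : PySem.Str.strip l = ""
    · have h2 : PySem.Chars.strip l.toList = [] := by
        have := congrArg String.toList hn; simpa using this
      have hA : pvStepA (g, c, nm) l = (g, c, nm) := by simp [pvStepA, hl, h2]
      simp only [List.foldl_cons, hA, List.filter_cons]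
      rw [ih g c nm hrest]
      simp [hn]
    · have h2 : PySem.Chars.strip l.toList ≠ [] := by
        intro he; exact hn (String.toList_eq_nil_iff.mp (by simpa using he))
      have h3 : 0 < (PySem.Chars.strip l.toList).length := List.length_pos_iff.mpr h2
      have hA : pvStepA (g, c, nm) l = (g, c ++ [l], nm) := by simp [pvStepA, hl, h3]
      simp only [List.foldl_cons, hA, List.filter_cons]
      rw [ih g (c ++ [l]) nm hrest]
      have hne : (PySem.Str.strip l == "") = false := by simp [hn]
      simp [hne]

-- main A-side lemma: from a header state, A's rest-of-loop + finalization = pvSpan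
theorem pvMainA : ∀ (k : Nat) (chunk : List String), chunk.length ≤ k →
    ∀ g h, pvIsHeader h = true →
    pvFinalA (chunk.foldl pvStepA (g, [], h)) = pvSpan (h :: chunk) g := by
  intro k
  induction k with
  | zero =>
    intro chunk hk g h hh
    have : chunk = [] := List.length_eq_zero_iff.mp (Nat.le_zero.mp hk)
    subst this
    have hst := pvHeader_strip h hh
    simp [pvFinalA, pvSpan, hst, PySem.Str.len, PySem.Str.strip]
  | succ k ih =>
    intro chunk hk g h hh
    set pre := chunk.takeWhile (fun l => !pvIsHeaderB l) with hpre
    set suf := chunk.dropWhile (fun l => !pvIsHeaderB l) with hsuf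
    have hsplit : pre ++ suf = chunk := List.takeWhile_append_dropWhile
    have hprenh : ∀ l ∈ pre, pvIsHeader l = false := by
      intro l hl
      have := List.mem_takeWhile_imp hl
      simpa [pvIsHeaderB_eq] using this
    have hfold1 : chunk.foldl pvStepA (g, [], h) =
        suf.foldl pvStepA (g, pre.filter (fun l => !(PySem.Str.strip l == "")), h) := by
      rw [← hsplit, List.foldl_append, pvNoHeader_fold pre g [] h hprenh]
      simp
    set c := pre.filter (fun l => !(PySem.Str.strip l == "")) with hc
    have hst := pvHeader_strip h hh
    cases hsufc : suf with
    | nil =>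
      rw [hfold1, hsufc]
      simp only [List.foldl_nil]
      rw [pvSpan]
      simp only [← hpre, ← hsuf, hsufc, ← hc]
      by_cases hcn : c = []
      · simp [pvFinalA, pvSpan, hcn]
      · have : 0 < c.length := List.length_pos_iff.mpr hcn
        simp [pvFinalA, pvSpan, hcn, this, hst, PySem.Str.len, PySem.Str.strip]
    | cons s rest =>
      have hsh : pvIsHeader s = true := by
        have := pvDropWhile_head (fun l => !pvIsHeaderB l) chunk s rest (hsuf.symm.trans hsufc)
        simpa [pvIsHeaderB_eq] using this
      have hstep : pvStepA (g, c, h) s =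
          ((if c == [] then g else g.insert h c), [], s) := by
        by_cases hcn : c = []
        · simp [pvStepA, hsh, hcn]
        · have : 0 < c.length := List.length_pos_iff.mpr hcn
          simp [pvStepA, hsh, hcn, this, hst, PySem.Str.len, PySem.Str.strip]
      have hlen : rest.length ≤ k := by
        have h1 : suf.length ≤ chunk.length := by
          rw [← hsplit]; simp
        rw [hsufc] at h1
        simp at h1
        omega
      rw [hfold1, hsufc]
      simp only [List.foldl_cons, hstep]
      rw [ih rest hlen _ s hsh]
      conv_rhs => rw [pvSpan]
      simp only [← hpre, ← hsuf, hsufc, ← hc]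
    -- done cons
-- B-side: pvOuterB on a suffix index = pvSpan on the dropped list
theorem pvSkipB_eq : ∀ (k : Nat) (lines : List String) (j : Nat), lines.length ≤ j + k →
    pvSkipB lines j = j + ((lines.drop j).takeWhile (fun l => !pvIsHeaderB l)).length := by
  intro k
  induction k with
  | zero =>
    intro lines j hk
    rw [pvSkipB]
    have hd : lines.drop j = [] := List.drop_eq_nil_of_le (by omega)
    simp [Nat.not_lt.mpr (by omega : lines.length ≤ j), hd]
  | succ k ih =>
    intro lines j hk
    rw [pvSkipB]
    by_cases h : j < lines.length
    · have hd : lines.drop j = lines[j] :: lines.drop (j + 1) := List.drop_eq_getElem_cons h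
      by_cases hh : pvIsHeaderB lines[j] = true
      · rw [dif_pos h, if_pos hh]
        conv_rhs => rw [hd, List.takeWhile_cons]
        simp [hh]
      · have hh' : pvIsHeaderB lines[j] = false := by simpa using hh
        rw [dif_pos h, if_neg (by simp [hh'])]
        rw [ih lines (j + 1) (by omega)]
        conv_rhs => rw [hd, List.takeWhile_cons]
        simp [hh']
        omega
    · have hd : lines.drop j = [] := List.drop_eq_nil_of_le (by omega)
      simp [h, hd]

theorem pvOuterB_eq_pvSpan : ∀ (k : Nat) (lines : List String) (i : Nat) g,
    lines.length ≤ i + k → pvOuterB lines i g = pvSpan (lines.drop i) g := by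
  intro k
  induction k with
  | zero =>
    intro lines i g hk
    rw [pvOuterB]
    have hd : lines.drop i = [] := List.drop_eq_nil_of_le (by omega)
    simp [Nat.not_lt.mpr (by omega : lines.length ≤ i), hd, pvSpan]
  | succ k ih =>
    intro lines i g hk
    by_cases h : i < lines.length
    · have hd : lines.drop i = lines[i] :: lines.drop (i + 1) := List.drop_eq_getElem_cons h
      set rest := lines.drop (i + 1) with hrest
      set pre := rest.takeWhile (fun l => !pvIsHeaderB l) with hpre
      set suf := rest.dropWhile (fun l => !pvIsHeaderB l) with hsuf
      have hj : pvSkipB lines (i + 1) = (i + 1) + pre.length :=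
        pvSkipB_eq (lines.length) lines (i + 1) (by omega)
      have hslice : (PySem.List.slice lines (some ((i : Int) + 1))
            (some ((pvSkipB lines (i + 1) : Int)))) = pre := by
        rw [PySem.List.slice_toNat lines (by omega) (by omega)]
        have e1 : ((i : Int) + 1).toNat = i + 1 := by omega
        have e2 : ((pvSkipB lines (i + 1) : Int)).toNat = (i + 1) + pre.length := by
          rw [hj]; omega
        rw [e1, e2]
        have e3 : (i + 1) + pre.length - (i + 1) = pre.length := by omega
        rw [e3, ← hrest]
        rw [← List.takeWhile_append_dropWhile (p := fun l => !pvIsHeaderB l) (l := rest), ← hpre, ← hsuf]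
        exact List.take_left' rfl
      have hdropj : lines.drop (pvSkipB lines (i + 1)) = suf := by
        rw [hj, ← List.drop_drop]
        rw [← hrest]
        rw [← List.takeWhile_append_dropWhile (p := fun l => !pvIsHeaderB l) (l := rest), ← hpre, ← hsuf]
        exact List.drop_left' rfl
      rw [pvOuterB, dif_pos h]
      simp only [hslice]
      rw [ih lines (pvSkipB lines (i + 1)) _ (by have := pvSkipB_ge lines (i + 1); omega)]
      rw [hdropj, hd]
      conv_rhs => rw [pvSpan]
    · rw [pvOuterB]
      have hd : lines.drop i = [] := List.drop_eq_nil_of_le (by omega)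
      simp [h, hd, pvSpan]

-- ===== VERDICT (by name: the statement is the Claim_ definition above) =====
theorem group_by_versions_spec : Claim_equal_group_by_versions := by
  intro lines _
  unfold Spec_group_by_versions group_by_versions group_by_versions_alt
  set pre0 := lines.takeWhile (fun l => !pvIsHeaderB l) with hpre0
  set suf0 := lines.dropWhile (fun l => !pvIsHeaderB l) with hsuf0
  have hsplit : pre0 ++ suf0 = lines := List.takeWhile_append_dropWhile
  have hprenh : ∀ l ∈ pre0, pvIsHeader l = false := by
    intro l hl
    have := List.mem_takeWhile_imp hl
    simpa [pvIsHeaderB_eq] using this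
  have hskip0 : pvSkipB lines 0 = pre0.length := by
    have := pvSkipB_eq lines.length lines 0 (by omega)
    simpa using this
  have hdrop0 : lines.drop (pvSkipB lines 0) = suf0 := by
    rw [hskip0, ← hsplit]
    exact List.drop_left' rfl
  have hB : pvOuterB lines (pvSkipB lines 0) PySem.Dict.empty = pvSpan suf0 PySem.Dict.empty := by
    rw [pvOuterB_eq_pvSpan lines.length lines _ _ (by omega), hdrop0]
  have hfold1 : lines.foldl pvStepA (PySem.Dict.empty, [], "") =
      suf0.foldl pvStepA (PySem.Dict.empty,
        pre0.filter (fun l => !(PySem.Str.strip l == "")), "") := by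
    rw [← hsplit, List.foldl_append, pvNoHeader_fold pre0 _ [] "" hprenh]
    simp
  set c0 := pre0.filter (fun l => !(PySem.Str.strip l == "")) with hc0
  cases hsufc : suf0 with
  | nil =>
    rw [hB, hsufc]
    rw [hfold1, hsufc]
    simp [pvSpan, PySem.Str.strip, PySem.Str.len, PySem.Chars.strip]
  | cons s rest =>
    have hsh : pvIsHeader s = true := by
      have := pvDropWhile_head (fun l => !pvIsHeaderB l) lines s rest (hsuf0.symm.trans hsufc)
      simpa [pvIsHeaderB_eq] using this
    have hstep : pvStepA (PySem.Dict.empty, c0, "") s = (PySem.Dict.empty, [], s) := by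
      by_cases hcn : c0 = []
      · simp [pvStepA, hsh, hcn]
      · have : 0 < c0.length := List.length_pos_iff.mpr hcn
        simp [pvStepA, hsh, this, PySem.Str.strip, PySem.Str.len, PySem.Chars.strip]
    rw [hB, hsufc]
    rw [hfold1, hsufc]
    simp only [List.foldl_cons, hstep]
    have := pvMainA rest.length rest (le_refl _) PySem.Dict.empty s hsh
    unfold pvFinalA at this
    rw [this]
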